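-- pv_equiv track=rewrite | github.com/Nasl0123/pocket-wikix | generadorALNAP.py | obtener_tarjeta_alnap
-- ===== SOURCE A (Python) =====
-- def ordenar_info(info):
--     info = info[1:]
--     resultado = {}
--     for i,e in enumerate(info):
--         if 'tarjeta' in e.lower() or 'credito diferido' in e.lower():
--             resultado[e] = []
--             for x in info[i+1:]:
--                 if 'tarjeta' in x.lower() or 'credito diferido' in x.lower():
--                     break
--                 else:
--                     resultado[e].append(x)
--     return resultado
--
-- def obtener_tarjeta_alnap(tarjeta,info):
--     resultado = {'comision_mora':''}
--     info = ordenar_info(info)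
--     for x in info:
--         if comparar_alnap(tarjeta,x):
--             for i,e in enumerate(info[x]):
--                 if 'emision' in e.lower():
--                     resultado['emision'] = info[x][i+1]
--                 elif 'renovacion' in e.lower():
--                     resultado['renovacion'] = info[x][i+1]
--                 elif 'proteccion' in e.lower():
--                     resultado['seguro_proteccion'] = info[x][i+1]
--                 elif 'avance' in e.lower() and 'efectivo' in e.lower():
--                     resultado['avance_efectivo'] = info[x][i+1]
--                 elif 'tasa' in e.lower() and 'financiamiento' in e.lower():
--                     resultado['tasa_interes'] = info[x][i+1]+'%'
--                 elif 'interes' in e.lower() and 'sobregiro' in e.lower():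
--                     resultado['sobregiro'] = 'RD$'+info[x][i+1]+'%'
--                 elif 'mora' in e.lower() and 'cargo' in e.lower():
--                     if 'us$' in e.lower():
--                         resultado['comision_mora'] = resultado['comision_mora']+info[x][i+1].replace('US','USD')
--                     else:
--                         resultado['comision_mora'] = resultado['comision_mora']+info[x][i+1]+'/'
--             break
--     return resultado
--
-- def comparar_alnap(tarjeta,dato):
--     tarjeta_list = tarjeta.split()
--     n = 0
--     for e in tarjeta_list:
--         if e in dato.lower():
--             n+=1
--     if n == len(tarjeta_list):
--         return True
--     return False
-- ===== SOURCE B (Python) =====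
-- def _grupos(info):
--     resultado = {}
--     clave = None
--     for e in info[1:]:
--         low = e.lower()
--         if 'tarjeta' in low or 'credito diferido' in low:
--             clave = e
--             resultado[e] = []
--         elif clave is not None:
--             resultado[clave].append(e)
--     return resultado
--
-- def _coincide(tarjeta, dato):
--     low = dato.lower()
--     return all(palabra in low for palabra in tarjeta.split())
--
-- def obtener_tarjeta_alnap(tarjeta, info):
--     resultado = {'comision_mora': ''}
--     for clave, datos in _grupos(info).items():
--         if _coincide(tarjeta, clave):
--             for e, siguiente in zip(datos, datos[1:]):
--                 low = e.lower()
--                 if 'emision' in low: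
--                     resultado['emision'] = siguiente
--                 elif 'renovacion' in low:
--                     resultado['renovacion'] = siguiente
--                 elif 'proteccion' in low:
--                     resultado['seguro_proteccion'] = siguiente
--                 elif 'avance' in low and 'efectivo' in low:
--                     resultado['avance_efectivo'] = siguiente
--                 elif 'tasa' in low and 'financiamiento' in low:
--                     resultado['tasa_interes'] = siguiente + '%'
--                 elif 'interes' in low and 'sobregiro' in low:
--                     resultado['sobregiro'] = 'RD$' + siguiente + '%'
--                 elif 'mora' in low and 'cargo' in low:
--                     if 'us$' in low:
--                         resultado['comision_mora'] += siguiente.replace('US', 'USD')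
--                     else:
--                         resultado['comision_mora'] += siguiente + '/'
--             break
--     return resultado
-- ===== Notes on version B (the rewrite author's own statement) =====
-- stated objective: simpler
-- what changed: Grouping is one forward pass with a current-key variable instead of a nested per-marker rescan of the tail, word matching uses all() instead of a match counter, and the extraction walks zip(datos, datos[1:]) pairs instead of indexing datos[i+1] under enumerate.
import Mathlib
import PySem

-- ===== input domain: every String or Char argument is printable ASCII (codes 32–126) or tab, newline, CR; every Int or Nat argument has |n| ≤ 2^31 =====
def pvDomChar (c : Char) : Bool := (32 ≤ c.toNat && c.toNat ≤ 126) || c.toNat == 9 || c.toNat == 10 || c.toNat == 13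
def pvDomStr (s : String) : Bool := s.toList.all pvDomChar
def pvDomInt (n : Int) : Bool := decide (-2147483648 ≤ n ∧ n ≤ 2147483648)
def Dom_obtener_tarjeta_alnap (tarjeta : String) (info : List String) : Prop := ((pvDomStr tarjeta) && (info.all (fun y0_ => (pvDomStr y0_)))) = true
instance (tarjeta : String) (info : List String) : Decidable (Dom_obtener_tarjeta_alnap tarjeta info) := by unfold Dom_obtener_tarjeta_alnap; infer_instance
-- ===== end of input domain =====

-- B rewrites the grouping as one forward pass with a current-key variable, the
-- comparison with all(), and the extraction over consecutive pairs; objective: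
-- simpler (one pass instead of a nested per-marker rescan).

-- ===== PORT A =====
-- 'tarjeta' in e.lower() or 'credito diferido' in e.lower()
def pvIsMarkerA (e : String) : Bool :=
  PySem.Str.isIn "tarjeta" (PySem.Str.lower e) || PySem.Str.isIn "credito diferido" (PySem.Str.lower e)

-- inner loop of ordenar_info: 'for x in info[i+1:]: break on marker, else resultado[e].append(x)';
-- the dict entry e is threaded through, appends via Dict.modify.
def pvInnerA (resultado : PySem.Dict String (List String)) (e : String) (xs : List String) :
    PySem.Dict String (List String) :=
  match xs with
  | [] => resultado
  | x :: rest =>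
    if pvIsMarkerA x then resultado
    else pvInnerA (resultado.modify e [] (fun l => l ++ [x])) e rest

-- outer loop of ordenar_info: 'for i,e in enumerate(info)'; in this structural
-- recursion 'rest' IS info[i+1:], so the inner scan runs on rest.
def pvOuterA (resultado : PySem.Dict String (List String)) (xs : List String) :
    PySem.Dict String (List String) :=
  match xs with
  | [] => resultado
  | e :: rest =>
    if pvIsMarkerA e then pvOuterA (pvInnerA (resultado.insert e []) e rest) rest
    else pvOuterA resultado rest

def ordenar_info (info : List String) : PySem.Dict String (List String) :=
  pvOuterA PySem.Dict.empty (PySem.List.slice info (some 1) none)   -- info = info[1:]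

def comparar_alnap (tarjeta dato : String) : Bool :=
  let tarjeta_list := PySem.Str.split₀ tarjeta
  let n : Int := tarjeta_list.foldl
    (fun n e => if PySem.Str.isIn e (PySem.Str.lower dato) then n + 1 else n) 0
  if n = (tarjeta_list.length : Int) then true else false

-- one iteration of the extraction loop of obtener_tarjeta_alnap; nxt? is
-- info[x][i+1] (none = Python's IndexError; the port skips that element).
def pvStepA (r : PySem.Dict String String) (e : String) (nxt? : Option String) :
    PySem.Dict String String :=
  if PySem.Str.isIn "emision" (PySem.Str.lower e) then
    match nxt? with | some v => r.insert "emision" v | none => r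
  else if PySem.Str.isIn "renovacion" (PySem.Str.lower e) then
    match nxt? with | some v => r.insert "renovacion" v | none => r
  else if PySem.Str.isIn "proteccion" (PySem.Str.lower e) then
    match nxt? with | some v => r.insert "seguro_proteccion" v | none => r
  else if PySem.Str.isIn "avance" (PySem.Str.lower e) && PySem.Str.isIn "efectivo" (PySem.Str.lower e) then
    match nxt? with | some v => r.insert "avance_efectivo" v | none => r
  else if PySem.Str.isIn "tasa" (PySem.Str.lower e) && PySem.Str.isIn "financiamiento" (PySem.Str.lower e) then
    match nxt? with | some v => r.insert "tasa_interes" (v ++ "%") | none => r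
  else if PySem.Str.isIn "interes" (PySem.Str.lower e) && PySem.Str.isIn "sobregiro" (PySem.Str.lower e) then
    match nxt? with | some v => r.insert "sobregiro" ("RD$" ++ v ++ "%") | none => r
  else if PySem.Str.isIn "mora" (PySem.Str.lower e) && PySem.Str.isIn "cargo" (PySem.Str.lower e) then
    match nxt? with
    | some v =>
      if PySem.Str.isIn "us$" (PySem.Str.lower e) then
        r.insert "comision_mora" (r.getD "comision_mora" "" ++ PySem.Str.replace v "US" "USD")
      else
        r.insert "comision_mora" (r.getD "comision_mora" "" ++ v ++ "/")
    | none => r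
  else r

-- 'for i,e in enumerate(info[x])': structural recursion, info[x][i+1] is rest.head?.
def pvExtractA (r : PySem.Dict String String) (xs : List String) : PySem.Dict String String :=
  match xs with
  | [] => r
  | e :: rest => pvExtractA (pvStepA r e rest.head?) rest

-- 'for x in info: if comparar_alnap(tarjeta,x): …; break' (iteration over the dict's keys)
def pvFindA (tarjeta : String) (d : PySem.Dict String (List String)) (keys : List String)
    (r : PySem.Dict String String) : PySem.Dict String String :=
  match keys with
  | [] => r
  | x :: rest =>
    if comparar_alnap tarjeta x then pvExtractA r (d.getD x [])
    else pvFindA tarjeta d rest r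

def obtener_tarjeta_alnap (tarjeta : String) (info : List String) : List (String × String) :=
  let resultado : PySem.Dict String String := PySem.Dict.empty.insert "comision_mora" ""
  let info' := ordenar_info info
  (pvFindA tarjeta info' info'.keys resultado).items

-- ===== PORT B =====
def pvIsMarkerB (low : String) : Bool :=
  PySem.Str.isIn "tarjeta" low || PySem.Str.isIn "credito diferido" low

-- single forward pass of _grupos: state = (resultado, clave)
def pvLoopB (resultado : PySem.Dict String (List String)) (clave : Option String)
    (xs : List String) : PySem.Dict String (List String) :=
  match xs with
  | [] => resultado
  | e :: rest =>
    if pvIsMarkerB (PySem.Str.lower e) then pvLoopB (resultado.insert e []) (some e) rest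
    else
      match clave with
      | some k => pvLoopB (resultado.modify k [] (fun l => l ++ [e])) (some k) rest
      | none => pvLoopB resultado clave rest

def pvGruposB (info : List String) : PySem.Dict String (List String) :=
  pvLoopB PySem.Dict.empty none (PySem.List.slice info (some 1) none)

def pvCoincideB (tarjeta dato : String) : Bool :=
  (PySem.Str.split₀ tarjeta).all (fun palabra => PySem.Str.isIn palabra (PySem.Str.lower dato))

-- the if/elif chain of B, over a (e, siguiente) pair from zip(datos, datos[1:])
def pvBranchB (r : PySem.Dict String String) (low siguiente : String) : PySem.Dict String String :=
  if PySem.Str.isIn "emision" low then r.insert "emision" siguiente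
  else if PySem.Str.isIn "renovacion" low then r.insert "renovacion" siguiente
  else if PySem.Str.isIn "proteccion" low then r.insert "seguro_proteccion" siguiente
  else if PySem.Str.isIn "avance" low && PySem.Str.isIn "efectivo" low then
    r.insert "avance_efectivo" siguiente
  else if PySem.Str.isIn "tasa" low && PySem.Str.isIn "financiamiento" low then
    r.insert "tasa_interes" (siguiente ++ "%")
  else if PySem.Str.isIn "interes" low && PySem.Str.isIn "sobregiro" low then
    r.insert "sobregiro" ("RD$" ++ siguiente ++ "%")
  else if PySem.Str.isIn "mora" low && PySem.Str.isIn "cargo" low then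
    if PySem.Str.isIn "us$" low then
      r.insert "comision_mora" (r.getD "comision_mora" "" ++ PySem.Str.replace siguiente "US" "USD")
    else
      r.insert "comision_mora" (r.getD "comision_mora" "" ++ siguiente ++ "/")
  else r

-- 'for clave, datos in _grupos(info).items(): … break'
def pvFindB (tarjeta : String) (items : List (String × List String))
    (r : PySem.Dict String String) : PySem.Dict String String :=
  match items with
  | [] => r
  | (clave, datos) :: rest =>
    if pvCoincideB tarjeta clave then
      (datos.zip (PySem.List.slice datos (some 1) none)).foldl
        (fun r p => pvBranchB r (PySem.Str.lower p.1) p.2) r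
    else pvFindB tarjeta rest r

def obtener_tarjeta_alnap_alt (tarjeta : String) (info : List String) : List (String × String) :=
  let resultado : PySem.Dict String String := PySem.Dict.empty.insert "comision_mora" ""
  (pvFindB tarjeta (pvGruposB info).items resultado).items

-- ===== PRECONDITION & SPEC =====
-- No Pre_: both ports are total and agree on every input. (Where Python A raises
-- IndexError — a keyword element ending the selected section — the A-port skips
-- that element, which is exactly what B computes; stated here, not proven about Python.)
def Spec_obtener_tarjeta_alnap (tarjeta : String) (info : List String) (out : List (String × String)) : Prop := out = obtener_tarjeta_alnap_alt tarjeta info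
instance (tarjeta : String) (info : List String) (out : List (String × String)) : Decidable (Spec_obtener_tarjeta_alnap tarjeta info out) := by unfold Spec_obtener_tarjeta_alnap; infer_instance

-- ===== CLAIM (what is proved, stated in full; the proofs are below) =====
def Claim_equal_obtener_tarjeta_alnap : Prop := ∀ (tarjeta : String) (info : List String), Dom_obtener_tarjeta_alnap tarjeta info → Spec_obtener_tarjeta_alnap tarjeta info (obtener_tarjeta_alnap tarjeta info)

-- ===== LEMMAS AND PROOFS =====

theorem pvMarker_eq (e : String) : pvIsMarkerA e = pvIsMarkerB (PySem.Str.lower e) := rfl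

-- B's forward pass with an open section k equals: A finishes section k (pvInnerA), then rescans.
theorem pvLoopB_some (xs : List String) :
    ∀ (d : PySem.Dict String (List String)) (k : String),
      pvLoopB d (some k) xs = pvOuterA (pvInnerA d k xs) xs := by
  induction xs with
  | nil => intro d k; rfl
  | cons x rest ih =>
    intro d k
    by_cases h : pvIsMarkerA x
    · simp [pvLoopB, pvOuterA, pvInnerA, ← pvMarker_eq, h, ih]
    · simp [pvLoopB, pvOuterA, pvInnerA, ← pvMarker_eq, h, ih]

theorem pvLoopB_none (xs : List String) :
    ∀ (d : PySem.Dict String (List String)), pvLoopB d none xs = pvOuterA d xs := by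
  induction xs with
  | nil => intro d; rfl
  | cons x rest ih =>
    intro d
    by_cases h : pvIsMarkerA x
    · simp [pvLoopB, pvOuterA, ← pvMarker_eq, h, pvLoopB_some]
    · simp [pvLoopB, pvOuterA, ← pvMarker_eq, h, ih]

theorem grupos_eq (info : List String) : pvGruposB info = ordenar_info info := by
  simp [pvGruposB, ordenar_info, pvLoopB_none]

theorem comparar_eq (tarjeta dato : String) : comparar_alnap tarjeta dato = pvCoincideB tarjeta dato := by
  simp only [comparar_alnap, pvCoincideB, PySem.List.foldl_count_if, zero_add]
  by_cases hc : (PySem.Str.split₀ tarjeta).countP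
      (fun e => PySem.Str.isIn e (PySem.Str.lower dato)) = (PySem.Str.split₀ tarjeta).length
  · have hall : ((PySem.Str.split₀ tarjeta).all
        (fun palabra => PySem.Str.isIn palabra (PySem.Str.lower dato))) = true := by
      rw [List.all_eq_true]; exact List.countP_eq_length.mp hc
    rw [if_pos (by exact_mod_cast hc), hall]
  · have hall : ((PySem.Str.split₀ tarjeta).all
        (fun palabra => PySem.Str.isIn palabra (PySem.Str.lower dato))) = false := by
      rw [← Bool.not_eq_true, List.all_eq_true]
      intro hforall; exact hc (List.countP_eq_length.mpr hforall)
    rw [if_neg (by exact_mod_cast hc), hall]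

theorem pvStepA_none (r : PySem.Dict String String) (e : String) :
    pvStepA r e none = r := by
  unfold pvStepA; split_ifs <;> rfl

theorem pvStepA_some (r : PySem.Dict String String) (e v : String) :
    pvStepA r e (some v) = pvBranchB r (PySem.Str.lower e) v := by
  unfold pvStepA pvBranchB; split_ifs <;> rfl

theorem extract_eq (xs : List String) : ∀ (r : PySem.Dict String String),
    pvExtractA r xs =
      (xs.zip (PySem.List.slice xs (some 1) none)).foldl
        (fun r p => pvBranchB r (PySem.Str.lower p.1) p.2) r := by
  have hsl : ∀ (ys : List String), PySem.List.slice ys (some 1) none = ys.drop 1 := by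
    intro ys; simp [pysem]
  induction xs with
  | nil => intro r; rfl
  | cons e rest ih =>
    intro r
    cases rest with
    | nil => simp [pvExtractA, pvStepA_none, hsl]
    | cons x t =>
      simp only [pvExtractA, List.head?, pvStepA_some, hsl] at *
      simp [List.zip, ih]

-- keys of the built dict are nodup (insert/modify preserve nodup keys)
theorem pvInnerA_nodup (xs : List String) : ∀ (d : PySem.Dict String (List String)) (e : String),
    d.keys.Nodup → (pvInnerA d e xs).keys.Nodup := by
  induction xs with
  | nil => intro d e h; exact h
  | cons x rest ih =>
    intro d e h
    unfold pvInnerA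
    split
    · exact h
    · exact ih _ e (by rw [PySem.Dict.keys_modify]; exact PySem.Dict.nodup_keys_insert _ _ _ h)

theorem pvOuterA_nodup (xs : List String) : ∀ (d : PySem.Dict String (List String)),
    d.keys.Nodup → (pvOuterA d xs).keys.Nodup := by
  induction xs with
  | nil => intro d h; exact h
  | cons e rest ih =>
    intro d h
    unfold pvOuterA
    split
    · exact ih _ (pvInnerA_nodup rest _ e (PySem.Dict.nodup_keys_insert _ _ _ h))
    · exact ih _ h

theorem find_eq (tarjeta : String) (d : PySem.Dict String (List String)) (hn : d.keys.Nodup) :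
    ∀ (ls : List (String × List String)) (r : PySem.Dict String String),
      (∀ p ∈ ls, p ∈ d.items) →
      pvFindA tarjeta d (ls.map Prod.fst) r = pvFindB tarjeta ls r := by
  intro ls
  induction ls with
  | nil => intro r _; rfl
  | cons p rest ih =>
    intro r hmem
    obtain ⟨clave, datos⟩ := p
    have hget : d.getD clave [] = datos :=
      PySem.Dict.getD_of_get?_eq_some d []
        (PySem.Dict.get?_of_mem_items d (hmem _ (List.mem_cons_self)) hn)
    simp only [List.map, pvFindA, pvFindB, comparar_eq]
    split
    · rw [hget, extract_eq]
    · exact ih r (fun q hq => hmem q (List.mem_cons_of_mem _ hq))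

-- ===== VERDICT (by name: the statement is the Claim_ definition above) =====
theorem obtener_tarjeta_alnap_spec : Claim_equal_obtener_tarjeta_alnap := by
  intro tarjeta info _
  unfold Spec_obtener_tarjeta_alnap obtener_tarjeta_alnap obtener_tarjeta_alnap_alt
  rw [grupos_eq]
  show (pvFindA tarjeta (ordenar_info info) (ordenar_info info).keys
      (PySem.Dict.empty.insert "comision_mora" "")).items =
    (pvFindB tarjeta (ordenar_info info).items
      (PySem.Dict.empty.insert "comision_mora" "")).items
  congr 1
  have hn : (ordenar_info info).keys.Nodup :=
    pvOuterA_nodup _ _ PySem.Dict.nodup_keys_empty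
  have hkeys : (ordenar_info info).keys = (ordenar_info info).items.map Prod.fst := rfl
  rw [hkeys]
  exact find_eq tarjeta (ordenar_info info) hn (ordenar_info info).items _ (fun p hp => hp)
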